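-- pv_equiv track=rewrite | github.com/macho715/convert | AGI TR 1-6 Transportation Master Gantt Chart/new/AGI_TR_MultiScenario_Master_Gantt_MAXOPTIONS.py | parse_voyage_pattern
-- ===== SOURCE A (Python) =====
-- def parse_voyage_pattern(pattern_str: str) -> list[list[int]]:
--     if not pattern_str:
--         return [[i] for i in range(1, 8)]
--
--     voyage_groups: list[list[int]] = []
--     tr_id = 1
--
--     if "x" in pattern_str:
--         parts = pattern_str.split("x")
--     elif "-" in pattern_str:
--         parts = pattern_str.split("-")
--     else:
--         parts = [pattern_str]
--
--     for part in parts: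
--         part = part.strip()
--         if not part:
--             continue
--         try:
--             count = int(part)
--         except ValueError:
--             continue
--         if count <= 0:
--             continue
--         voyage_groups.append(list(range(tr_id, tr_id + count)))
--         tr_id += count
--
--     return voyage_groups or [[i] for i in range(1, 8)]
-- ===== SOURCE B (Python) =====
-- def _count(p: str):
--     p = p.strip()
--     if not p:
--         return None
--     try:
--         c = int(p)
--     except ValueError:
--         return None
--     return c if c > 0 else None
--
--
-- def _chunks(flat: list[int], counts: list[int]) -> list[list[int]]:
--     if not counts:
--         return []
--     c = counts[0]
--     return [flat[:c]] + _chunks(flat[c:], counts[1:])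
--
--
-- def parse_voyage_pattern(pattern_str: str) -> list[list[int]]:
--     default = [[i] for i in range(1, 8)]
--     if not pattern_str:
--         return default
--
--     if "x" in pattern_str:
--         parts = pattern_str.split("x")
--     elif "-" in pattern_str:
--         parts = pattern_str.split("-")
--     else:
--         parts = [pattern_str]
--
--     counts = [c for c in map(_count, parts) if c is not None]
--     # one flat global sequence of all voyage ids, sliced recursively into chunks
--     flat = list(range(1, sum(counts) + 1))
--     return _chunks(flat, counts) or default
-- ===== Notes on version B (the rewrite author's own statement) =====
-- stated objective: alternative
-- what changed: Instead of A's single loop that keeps a mutable running start (tr_id) and appends a freshly constructed range per part, B materialises ONE flat global list range(1, total+1) of all voyage ids and recursively slices it into chunks of the parsed counts, so no per-group start is ever computed.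
import Mathlib
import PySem

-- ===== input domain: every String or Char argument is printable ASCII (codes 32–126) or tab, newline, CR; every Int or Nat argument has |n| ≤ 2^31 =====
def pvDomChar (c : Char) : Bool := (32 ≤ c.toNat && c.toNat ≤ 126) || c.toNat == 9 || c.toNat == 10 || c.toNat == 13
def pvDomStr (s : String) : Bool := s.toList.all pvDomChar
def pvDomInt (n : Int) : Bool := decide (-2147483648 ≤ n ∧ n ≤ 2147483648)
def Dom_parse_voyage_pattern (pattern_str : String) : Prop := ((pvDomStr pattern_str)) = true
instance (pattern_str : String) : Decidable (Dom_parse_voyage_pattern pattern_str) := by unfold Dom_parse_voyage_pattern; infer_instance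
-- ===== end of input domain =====

-- B replaces A's running-start accumulating loop by building ONE flat global list range(1, total+1)
-- and recursively slicing it into chunks of the parsed counts (alternative decomposition, same cost).

-- ===== PORT A =====
-- A's loop body, named so the equivalence lemmas can refer to it (literal transcription of the for-body).
def pvStepA (st : List (List Int) × Int) (part : String) : List (List Int) × Int :=
  let part := PySem.Str.strip part
  if part = "" then st
  else
    match PySem.Int.ofStr? part with
    | none => st
    | some count =>
      if count ≤ 0 then st
      else (st.1 ++ [PySem.List.pyRange st.2 (st.2 + count) 1], st.2 + count)

-- '.getD []' only discharges split?'s none case, which is impossible for the non-empty literal separators.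
def parse_voyage_pattern (pattern_str : String) : List (List Int) :=
  if pattern_str = "" then (PySem.List.pyRange 1 8 1).map (fun i => [i])
  else
    let parts :=
      if PySem.Str.isIn "x" pattern_str then (PySem.Str.split? pattern_str "x").getD []
      else if PySem.Str.isIn "-" pattern_str then (PySem.Str.split? pattern_str "-").getD []
      else [pattern_str]
    let st := parts.foldl pvStepA ([], 1)
    if st.1 = [] then (PySem.List.pyRange 1 8 1).map (fun i => [i]) else st.1

-- ===== PORT B =====
-- Source B's _count: strip, skip empty / unparsable / non-positive.
def pvCount? (p : String) : Option Int :=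
  if PySem.Str.strip p = "" then none
  else
    match PySem.Int.ofStr? (PySem.Str.strip p) with
    | none => none
    | some c => if 0 < c then some c else none

-- Source B's _chunks: recursive slicing of the one flat list (flat[:c] / flat[c:] as Python slices).
def pvChunks : List Int → List Int → List (List Int)
  | _, [] => []
  | flat, c :: cs =>
      PySem.List.slice flat none (some c) :: pvChunks (PySem.List.slice flat (some c) none) cs

def parse_voyage_pattern_alt (pattern_str : String) : List (List Int) :=
  if pattern_str = "" then (PySem.List.pyRange 1 8 1).map (fun i => [i])
  else
    let parts :=
      if PySem.Str.isIn "x" pattern_str then (PySem.Str.split? pattern_str "x").getD []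
      else if PySem.Str.isIn "-" pattern_str then (PySem.Str.split? pattern_str "-").getD []
      else [pattern_str]
    let counts := parts.filterMap pvCount?
    let flat := PySem.List.pyRange 1 (counts.sum + 1) 1
    let groups := pvChunks flat counts
    if groups = [] then (PySem.List.pyRange 1 8 1).map (fun i => [i]) else groups

-- ===== PRECONDITION & SPEC =====
def Spec_parse_voyage_pattern (pattern_str : String) (out : List (List Int)) : Prop := out = parse_voyage_pattern_alt pattern_str
instance (pattern_str : String) (out : List (List Int)) : Decidable (Spec_parse_voyage_pattern pattern_str out) := by unfold Spec_parse_voyage_pattern; infer_instance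

-- ===== CLAIM (what is proved, stated in full; the proofs are below) =====
def Claim_equal_parse_voyage_pattern : Prop := ∀ (pattern_str : String), Dom_parse_voyage_pattern pattern_str → Spec_parse_voyage_pattern pattern_str (parse_voyage_pattern pattern_str)

-- ===== LEMMAS AND PROOFS =====

/-- Canonical description of A's loop output: the groups built from counts starting at offset t. -/
def pvBuild (t : Int) : List Int → List (List Int)
  | [] => []
  | c :: cs => PySem.List.pyRange t (t + c) 1 :: pvBuild (t + c) cs

lemma pvFoldA_eq (parts : List String) (gs : List (List Int)) (t : Int) :
    parts.foldl pvStepA (gs, t) =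
      (gs ++ pvBuild t (parts.filterMap pvCount?),
       t + (parts.filterMap pvCount?).sum) := by
  induction parts generalizing gs t with
  | nil => simp [pvBuild]
  | cons p ps ih =>
    have hstep : ∀ gs t, List.foldl pvStepA (gs, t) (p :: ps) =
        List.foldl pvStepA (pvStepA (gs, t) p) ps := by intro _ _; rfl
    by_cases h0 : PySem.Str.strip p = ""
    · rw [hstep]
      simp [pvStepA, pvCount?, h0, ih]
    · cases hof : PySem.Int.ofStr? (PySem.Str.strip p) with
      | none =>
        rw [hstep]
        simp [pvStepA, pvCount?, h0, hof, ih]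
      | some c =>
        by_cases hpos : 0 < c
        · have hle : ¬ c ≤ 0 := by omega
          have hcp : pvCount? p = some c := by
            simp [pvCount?, h0, hof, hpos]
          rw [hstep]
          simp only [pvStepA, h0, hof, if_neg hle, List.filterMap_cons, hcp]
          rw [ih]
          simp [pvBuild, List.append_assoc, add_assoc]
        · have hle : c ≤ 0 := by omega
          rw [hstep]
          simp [pvStepA, pvCount?, h0, hof, hle, hpos, ih]

lemma pvCount?_pos (p : String) (c : Int) (h : pvCount? p = some c) : 0 < c := by
  unfold pvCount? at h
  split_ifs at h with h0
  cases hof : PySem.Int.ofStr? (PySem.Str.strip p) with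
  | none => rw [hof] at h; exact absurd h (by simp)
  | some c' =>
    rw [hof] at h
    by_cases hpos : 0 < c'
    · rw [show (match some c' with
          | none => (none : Option Int)
          | some c => if 0 < c then some c else none) = if 0 < c' then some c' else none
          from rfl, if_pos hpos] at h
      cases h; exact hpos
    · rw [show (match some c' with
          | none => (none : Option Int)
          | some c => if 0 < c then some c else none) = if 0 < c' then some c' else none
          from rfl, if_neg hpos] at h
      exact absurd h (by simp)

/-- Chunking the flat range [t, t+sum) by nonnegative counts yields exactly the per-count ranges. -/
lemma pvChunks_pyRange (counts : List Int) (t : Int)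
    (hpos : ∀ c ∈ counts, 0 ≤ c) :
    pvChunks (PySem.List.pyRange t (t + counts.sum) 1) counts = pvBuild t counts := by
  induction counts generalizing t with
  | nil => simp [pvChunks, pvBuild]
  | cons c cs ih =>
    have hc : 0 ≤ c := hpos c (by simp)
    have hcs : 0 ≤ cs.sum := List.sum_nonneg (fun x hx => hpos x (by simp [hx]))
    have hsplit : PySem.List.pyRange t (t + (c :: cs).sum) 1 =
        PySem.List.pyRange t (t + c) 1 ++ PySem.List.pyRange (t + c) (t + (c :: cs).sum) 1 := by
      refine PySem.List.pyRange_one_append t (t + c) (t + (c :: cs).sum) (by omega) ?_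
      simp only [List.sum_cons]; omega
    have hlen : (PySem.List.pyRange t (t + c) 1).length = c.toNat := by
      rw [PySem.List.length_pyRange_one]; omega
    rw [hsplit]
    unfold pvChunks
    have hslice1 : PySem.List.slice
        (PySem.List.pyRange t (t + c) 1 ++ PySem.List.pyRange (t + c) (t + (c :: cs).sum) 1)
        none (some c) = PySem.List.pyRange t (t + c) 1 := by
      rw [PySem.List.slice_to _ hc]
      rw [List.take_append_of_le_length (by omega)]
      rw [List.take_of_length_le (by omega)]
    have hslice2 : PySem.List.slice
        (PySem.List.pyRange t (t + c) 1 ++ PySem.List.pyRange (t + c) (t + (c :: cs).sum) 1)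
        (some c) none = PySem.List.pyRange (t + c) (t + (c :: cs).sum) 1 := by
      rw [PySem.List.slice_from _ hc]
      rw [List.drop_append_of_le_length (by omega)]
      rw [List.drop_of_length_le (by omega)]
      simp
    rw [hslice1, hslice2]
    have htail : t + (c :: cs).sum = (t + c) + cs.sum := by simp; omega
    rw [htail, ih (t + c) (fun x hx => hpos x (by simp [hx]))]
    rfl

-- ===== VERDICT (by name: the statement is the Claim_ definition above) =====
theorem parse_voyage_pattern_spec : Claim_equal_parse_voyage_pattern := by
  intro s _
  unfold Spec_parse_voyage_pattern parse_voyage_pattern parse_voyage_pattern_alt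
  by_cases hs : s = ""
  · simp [hs]
  · simp only [if_neg hs]
    rw [pvFoldA_eq]
    simp only [List.nil_append]
    have hpos : ∀ c ∈ (List.filterMap pvCount?
        (if PySem.Str.isIn "x" s = true then (PySem.Str.split? s "x").getD []
         else if PySem.Str.isIn "-" s = true then (PySem.Str.split? s "-").getD [] else [s])), (0:Int) ≤ c := by
      intro c hc
      obtain ⟨p, _, hp⟩ := List.mem_filterMap.mp hc
      exact le_of_lt (pvCount?_pos p c hp)
    rw [show ∀ S : Int, S + 1 = 1 + S from fun S => by ring]
    rw [pvChunks_pyRange _ 1 hpos]
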